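-- pv_equiv track=rewrite | github.com/ahblay/657Project | segclobber.py | evaluate_base_cases
-- ===== SOURCE A (Python) =====
-- def evaluate_base_cases(pattern, base_cases):
--     result = {}
--     games = sorted(base_cases.keys(), key=len)
--     for g in games:
--         if len(set(base_cases.values())) == 1:
--             result[pattern] = base_cases[g]
--             break
--         result[g] = base_cases[g]
--         base_cases.pop(g)
--     return result
-- ===== SOURCE B (Python) =====
-- def evaluate_base_cases(pattern, base_cases):
--     games = sorted(base_cases.keys(), key=len)
--     if not games:
--         return {}
--     vals = [base_cases[g] for g in games]
--     i = len(vals) - 1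
--     while i > 0 and vals[i - 1] == vals[i]:
--         i -= 1
--     result = dict(zip(games[:i], vals[:i]))
--     result[pattern] = vals[i]
--     return result
-- ===== Notes on version B (the rewrite author's own statement) =====
-- stated objective: faster
-- what changed: Instead of A's loop that pops one game per pass and rebuilds set(values) of the shrinking dict on every pass, B reads all values once in sorted-key order and finds the break boundary with a single backward scan of adjacent values, then builds the result in one shot.
import Mathlib
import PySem

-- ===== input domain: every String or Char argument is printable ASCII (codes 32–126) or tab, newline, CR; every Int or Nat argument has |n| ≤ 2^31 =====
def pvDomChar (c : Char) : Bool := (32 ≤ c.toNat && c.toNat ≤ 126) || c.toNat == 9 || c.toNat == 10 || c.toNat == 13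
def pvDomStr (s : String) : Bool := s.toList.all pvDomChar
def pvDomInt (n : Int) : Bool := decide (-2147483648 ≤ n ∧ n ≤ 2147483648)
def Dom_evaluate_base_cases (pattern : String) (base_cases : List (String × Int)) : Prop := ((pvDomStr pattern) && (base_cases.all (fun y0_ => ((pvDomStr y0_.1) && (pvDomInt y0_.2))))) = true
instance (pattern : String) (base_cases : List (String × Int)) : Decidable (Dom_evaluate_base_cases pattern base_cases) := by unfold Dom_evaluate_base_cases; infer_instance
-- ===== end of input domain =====

-- B replaces A's pop-one-game-per-pass loop (which rebuilds set(values) on every pass) by a single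
-- backward scan for the boundary index where the remaining values become all equal (objective: faster).
-- A mutates its dict argument (pop); B does not — the equivalence proved here is about the RETURN value.

-- ===== PORT A =====
-- A's for-loop: state = (remaining games, remaining dict, result dict); the break returns result
def aLoop (pattern : String) : List String → PySem.Dict String Int → PySem.Dict String Int → PySem.Dict String Int
  | [], _, result => result
  | g :: rest, bc, result =>
    if PySem.Set.len (PySem.Set.ofList bc.values) == 1 then
      -- result[pattern] = base_cases[g]; break  (g is always present in bc here, so getD is exact for bc[g])
      result.insert pattern (bc.getD g 0)
    else
      -- result[g] = base_cases[g]; base_cases.pop(g)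
      aLoop pattern rest (bc.erase g) (result.insert g (bc.getD g 0))

def evaluate_base_cases (pattern : String) (base_cases : List (String × Int)) : List (String × Int) :=
  let bc := PySem.Dict.ofList base_cases
  let games := PySem.List.sorted bc.keys (fun g => PySem.Str.len g) false
  (aLoop pattern games bc PySem.Dict.empty).items

-- ===== PORT B =====
-- Source B's backward while-loop: i = len(vals)-1; while i > 0 and vals[i-1] == vals[i]: i -= 1
-- (every index it touches is in range, so List.getD is exact for Python's vals[·])
def bScan (vals : List Int) : Nat → Nat
  | 0 => 0
  | j + 1 => if vals.getD j 0 == vals.getD (j + 1) 0 then bScan vals j else j + 1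

def evaluate_base_cases_alt (pattern : String) (base_cases : List (String × Int)) : List (String × Int) :=
  let bc := PySem.Dict.ofList base_cases
  let games := PySem.List.sorted bc.keys (fun g => PySem.Str.len g) false
  if games.isEmpty then []
  else
    let vals := games.map (fun g => bc.getD g 0)
    let i := bScan vals (vals.length - 1)
    ((PySem.Dict.ofList ((games.take i).zip (vals.take i))).insert pattern (vals.getD i 0)).items

-- ===== PRECONDITION & SPEC =====
def Spec_evaluate_base_cases (pattern : String) (base_cases : List (String × Int)) (out : List (String × Int)) : Prop := out = evaluate_base_cases_alt pattern base_cases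
instance (pattern : String) (base_cases : List (String × Int)) (out : List (String × Int)) : Decidable (Spec_evaluate_base_cases pattern base_cases out) := by unfold Spec_evaluate_base_cases; infer_instance

-- ===== CLAIM (what is proved, stated in full; the proofs are below) =====
def Claim_equal_evaluate_base_cases : Prop := ∀ (pattern : String) (base_cases : List (String × Int)), Dom_evaluate_base_cases pattern base_cases → Spec_evaluate_base_cases pattern base_cases (evaluate_base_cases pattern base_cases)

-- ===== LEMMAS AND PROOFS =====

theorem setlen_one_iff (l : List Int) :
    (PySem.Set.len (PySem.Set.ofList l) == 1) = true ↔ ∃ v, v ∈ l ∧ ∀ x ∈ l, x = v := by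
  have hmem : ∀ x, x ∈ PySem.Set.ofList l ↔ x ∈ l := fun x => PySem.Set.mem_ofList l x
  have hnd : (PySem.Set.ofList l).Nodup := PySem.Set.nodup_ofList l
  constructor
  · intro h
    have hlen : (PySem.Set.ofList l).length = 1 := by
      simp only [PySem.Set.len, beq_iff_eq] at h
      exact_mod_cast h
    obtain ⟨a, ha⟩ := List.length_eq_one_iff.mp hlen
    refine ⟨a, (hmem a).mp (by simp [ha]), fun x hx => ?_⟩
    have := (hmem x).mpr hx
    rw [ha] at this; simpa using this
  · rintro ⟨v, hv, hall⟩
    have heq : PySem.Set.ofList l = [v] := by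
      cases hsl : PySem.Set.ofList l with
      | nil => rw [hsl] at hmem; simpa using ((hmem v).mpr hv)
      | cons a t =>
        rw [hsl] at hmem hnd
        have ha : a = v := hall a ((hmem a).mp (by simp))
        have ht : t = [] := by
          cases t with
          | nil => rfl
          | cons b t' =>
            have hb : b = v := hall b ((hmem b).mp (by simp))
            subst ha hb
            simp at hnd
        rw [ha, ht]
    simp [PySem.Set.len, heq]


theorem keys_erase_dict (d : PySem.Dict String Int) (g : String) :
    (d.erase g).keys = d.keys.filter (fun k => !(k == g)) := by
  simp [PySem.Dict.erase, PySem.Dict.keys, List.filter_map]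
  rfl

theorem getD_erase_of_ne (d : PySem.Dict String Int) (g k : String) (h : k ≠ g) :
    (d.erase g).getD k 0 = d.getD k 0 := by
  simp only [PySem.Dict.getD, PySem.Dict.get?, PySem.Dict.erase]
  congr 2
  induction d.items with
  | nil => rfl
  | cons p rest ih =>
    by_cases hpg : p.1 = g
    · have hgk : (g == k) = false := beq_eq_false_iff_ne.mpr (Ne.symm h)
      simp [List.filter_cons, hpg, hgk, ih]
    · by_cases hpk : p.1 = k
      · simp [List.filter_cons, hpk, h]
      · simp [List.filter_cons, hpg, hpk, ih]

theorem bScan_cons (v0 : Int) (vals' : List Int) (k : Nat) :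
    bScan (v0 :: vals') (k + 1) =
      if bScan vals' k = 0 ∧ v0 = vals'.getD 0 0 then 0 else bScan vals' k + 1 := by
  induction k with
  | zero =>
    by_cases h : v0 = vals'.getD 0 0
    · rw [show bScan (v0 :: vals') 1 =
          (if v0 == vals'.getD 0 0 then (0 : Nat) else 1) from rfl,
        if_pos (beq_iff_eq.mpr h), if_pos ⟨rfl, h⟩]
    · rw [show bScan (v0 :: vals') 1 =
          (if v0 == vals'.getD 0 0 then (0 : Nat) else 1) from rfl,
        if_neg (by simpa using h), if_neg (by exact fun hc => h hc.2)]
      rfl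
  | succ k ih =>
    have hstep : bScan (v0 :: vals') (k + 1 + 1) =
        if vals'.getD k 0 == vals'.getD (k + 1) 0 then bScan (v0 :: vals') (k + 1)
        else k + 1 + 1 := rfl
    have hb : bScan vals' (k + 1) =
        if vals'.getD k 0 == vals'.getD (k + 1) 0 then bScan vals' k else k + 1 := rfl
    by_cases he : vals'.getD k 0 = vals'.getD (k + 1) 0
    · have hL : bScan (v0 :: vals') (k + 1 + 1) = bScan (v0 :: vals') (k + 1) := by
        rw [hstep, if_pos (beq_iff_eq.mpr he)]
      have hR : bScan vals' (k + 1) = bScan vals' k := by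
        rw [hb, if_pos (beq_iff_eq.mpr he)]
      rw [hL, ih, hR]
    · have hL : bScan (v0 :: vals') (k + 1 + 1) = k + 1 + 1 := by
        rw [hstep, if_neg (by simpa using he)]
      have hR : bScan vals' (k + 1) = k + 1 := by
        rw [hb, if_neg (by simpa using he)]
      rw [hL, hR, if_neg (by exact fun hc => Nat.succ_ne_zero k hc.1)]

theorem bScan_zero_iff (vals : List Int) :
    bScan vals (vals.length - 1) = 0 ↔ ∀ x ∈ vals, x = vals.getD 0 0 := by
  induction vals with
  | nil => simp [bScan]
  | cons v0 vals' ih =>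
    cases vals' with
    | nil => simp [bScan]
    | cons w t =>
      have hlen : (v0 :: w :: t).length - 1 = ((w :: t).length - 1) + 1 := by simp
      rw [hlen, bScan_cons]
      constructor
      · intro h
        split_ifs at h with hc
        · obtain ⟨h0, hv⟩ := hc
          have hall' := ih.mp h0
          intro x hx
          rcases List.mem_cons.mp hx with rfl | hx'
          · rfl
          · show x = v0
            rw [hall' x hx']
            exact hv.symm
      · intro hall
        have hw : w = v0 := hall w (by simp)
        have h0 : bScan (w :: t) ((w :: t).length - 1) = 0 := by
          apply ih.mpr
          intro x hx
          show x = w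
          rw [hall x (List.mem_cons_of_mem _ hx)]
          simpa using hw.symm
        rw [if_pos ⟨h0, hw.symm⟩]

theorem loop_eq (pattern : String) :
    ∀ (gs : List String) (d : PySem.Dict String Int) (res : PySem.Dict String Int),
      d.keys.Nodup → gs.Perm d.keys →
      aLoop pattern gs d res =
        (if gs = [] then res
         else
           let vals := gs.map (fun g => d.getD g 0)
           let i := bScan vals (vals.length - 1)
           (((gs.take i).zip (vals.take i)).foldl (fun t p => t.insert p.1 p.2) res).insert
             pattern (vals.getD i 0)) := by
  intro gs
  induction gs with
  | nil => intro d res _ _; simp [aLoop]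
  | cons g rest ih =>
    intro d res hnd hperm
    have hgsnd : (g :: rest).Nodup := hperm.nodup_iff.mpr hnd
    have hvalsperm : ((g :: rest).map (fun x => d.getD x 0)).Perm d.values := by
      rw [PySem.Dict.values_eq_map_keys d hnd 0]
      exact hperm.map _
    have htest : (PySem.Set.len (PySem.Set.ofList d.values) == 1) = true ↔
        ∀ x ∈ (g :: rest).map (fun x => d.getD x 0), x = d.getD g 0 := by
      rw [setlen_one_iff]
      constructor
      · rintro ⟨v, hvmem, hall⟩ x hx
        have hx' : x ∈ d.values := hvalsperm.subset hx
        have hg' : d.getD g 0 ∈ d.values := hvalsperm.subset (by simp)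
        rw [hall x hx', hall _ hg']
      · intro hall
        refine ⟨d.getD g 0, hvalsperm.subset (by simp), fun x hx => ?_⟩
        exact hall x (hvalsperm.symm.subset hx)
    by_cases hT : (PySem.Set.len (PySem.Set.ofList d.values) == 1) = true
    · have hl : aLoop pattern (g :: rest) d res = res.insert pattern (d.getD g 0) := by
        simp only [aLoop, if_pos hT]
      rw [hl]
      have hall := htest.mp hT
      have hi : bScan ((g :: rest).map (fun x => d.getD x 0))
          (((g :: rest).map (fun x => d.getD x 0)).length - 1) = 0 := by
        rw [bScan_zero_iff]
        intro x hx
        rw [hall x hx]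
        simp
      simp only [List.map_cons, List.length_cons, List.length_map, Nat.add_sub_cancel] at hi
      simp [hi]
    · have hl : aLoop pattern (g :: rest) d res =
          aLoop pattern rest (d.erase g) (res.insert g (d.getD g 0)) := by
        simp only [aLoop, if_neg hT]
      rw [hl]
      have hgnotin : g ∉ rest := (List.nodup_cons.mp hgsnd).1
      have hnd' : (d.erase g).keys.Nodup := by
        rw [keys_erase_dict]; exact hnd.filter _
      have hperm' : rest.Perm (d.erase g).keys := by
        rw [keys_erase_dict]
        have h1 : List.filter (fun k => !(k == g)) d.keys = d.keys.erase g := by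
          rw [List.Nodup.erase_eq_filter hnd g]
          simp [bne]
        rw [h1]
        have h2 := (hperm.erase g).symm
        rw [List.erase_cons_head] at h2
        exact h2.symm
      rw [ih (d.erase g) (res.insert g (d.getD g 0)) hnd' hperm']
      have hrw : rest.map (fun x => (d.erase g).getD x 0) = rest.map (fun x => d.getD x 0) := by
        apply List.map_congr_left
        intro x hx
        exact getD_erase_of_ne d g x (fun hxg => hgnotin (hxg ▸ hx))
      rcases rest with _ | ⟨r, rs⟩
      · exfalso
        apply hT
        apply htest.mpr
        intro x hx
        simp at hx
        rw [hx]
      · rw [hrw]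
        have hcond : ¬(bScan ((r :: rs).map (fun x => d.getD x 0))
            (((r :: rs).map (fun x => d.getD x 0)).length - 1) = 0 ∧
            d.getD g 0 = ((r :: rs).map (fun x => d.getD x 0)).getD 0 0) := by
          rintro ⟨h0, hv⟩
          apply hT
          apply htest.mpr
          have hall' := (bScan_zero_iff _).mp h0
          intro x hx
          simp only [List.map_cons, List.mem_cons] at hx
          rcases hx with rfl | hx'
          · rfl
          · rw [hall' x (by simpa using hx'), ← hv]
        have hi : bScan ((g :: r :: rs).map (fun x => d.getD x 0))
            (((g :: r :: rs).map (fun x => d.getD x 0)).length - 1) =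
            bScan ((r :: rs).map (fun x => d.getD x 0))
              (((r :: rs).map (fun x => d.getD x 0)).length - 1) + 1 := by
          have hlen : ((g :: r :: rs).map (fun x => d.getD x 0)).length - 1 =
              ((((r :: rs).map (fun x => d.getD x 0)).length - 1)) + 1 := by simp
          rw [hlen, List.map_cons, bScan_cons, if_neg hcond]
        simp only [if_neg (List.cons_ne_nil _ _), List.map_cons] at hi ⊢
        rw [hi]
        simp [List.take_succ_cons, List.getD_cons_succ]

-- ===== VERDICT (by name: the statement is the Claim_ definition above) =====
theorem evaluate_base_cases_spec : Claim_equal_evaluate_base_cases := by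
  intro pattern base_cases _
  unfold Spec_evaluate_base_cases evaluate_base_cases evaluate_base_cases_alt
  dsimp only
  rw [loop_eq pattern _ _ _ (PySem.Dict.nodup_keys_ofList base_cases)
    (PySem.List.sorted_perm _ _ _)]
  by_cases h : PySem.List.sorted (PySem.Dict.ofList base_cases).keys (fun g => PySem.Str.len g) false = []
  · rw [if_pos h, if_pos (by rw [List.isEmpty_iff]; exact h)]
    rfl
  · rw [if_neg h, if_neg (by rw [List.isEmpty_iff]; exact h)]
    rfl
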